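-- pv_equiv track=rewrite | github.com/JustinLee32/2020_chun_qiu_zhao | 牛客网/wysxs2019/6.py | check
-- ===== SOURCE A (Python) =====
-- def check(queue):
--     if len(queue) <= 1:
--         return queue
--     temp_list = queue[:-1]
--     temp_list.sort(reverse=False, key=lambda x: x[1])
--     for i in range(len(queue)-2, -1, -1):
--         low = queue[i][1]
--         up = queue[-1][0]
--         if low > up:
--             continue
--         elif low <= up:
--             return queue[i+1:]
--     return queue
-- ===== SOURCE B (Python) =====
-- def check(queue):
--     if len(queue) <= 1:
--         return queue
--     up = queue[-1][0]
--     ans = queue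
--     for i, item in enumerate(queue[:-1]):
--         if item[1] <= up:
--             ans = queue[i+1:]
--     return ans
-- ===== Notes on version B (the rewrite author's own statement) =====
-- stated objective: simpler
-- what changed: Replaces A's backward range(len-2,-1,-1) scan with early return (and drops A's dead sort of temp_list) by a single forward enumerate fold that keeps the slice after the last index whose second component is <= queue[-1][0].
import Mathlib
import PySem

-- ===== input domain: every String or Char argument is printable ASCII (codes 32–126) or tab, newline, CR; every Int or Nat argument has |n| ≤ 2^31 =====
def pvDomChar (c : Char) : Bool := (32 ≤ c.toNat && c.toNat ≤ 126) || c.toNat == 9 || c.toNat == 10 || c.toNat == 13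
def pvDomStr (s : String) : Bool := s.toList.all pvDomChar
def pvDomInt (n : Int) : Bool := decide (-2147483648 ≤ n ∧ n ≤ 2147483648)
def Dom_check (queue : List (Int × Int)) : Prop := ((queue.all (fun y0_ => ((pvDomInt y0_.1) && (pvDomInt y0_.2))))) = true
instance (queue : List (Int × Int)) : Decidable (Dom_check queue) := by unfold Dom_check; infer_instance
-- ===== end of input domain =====

-- B replaces A's backward short-circuit scan (plus a dead sort) by a single forward
-- fold that keeps the slice after the last matching index; objective: simpler.

-- ===== PORT A =====
-- A's backward loop 'for i in range(len(queue)-2, -1, -1)' with early return.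
def checkGo (queue : List (Int × Int)) : List Int → List (Int × Int)
  | [] => queue
  | i :: rest =>
    let low := (PySem.List.pyGetD queue i (0, 0)).2
    let up := (PySem.List.pyGetD queue (-1) (0, 0)).1
    if low > up then checkGo queue rest
    else PySem.List.slice queue (some (i + 1)) none

def check (queue : List (Int × Int)) : List (Int × Int) :=
  if queue.length ≤ 1 then queue
  else
    -- temp_list is sorted and then never used in A; kept literally, unused.
    let _temp_list := PySem.List.sorted (PySem.List.slice queue none (some (-1))) (fun x => x.2) false
    checkGo queue (PySem.List.pyRange ((queue.length : Int) - 2) (-1) (-1))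

-- ===== PORT B =====
def check_alt (queue : List (Int × Int)) : List (Int × Int) :=
  if queue.length ≤ 1 then queue
  else
    let up := (PySem.List.pyGetD queue (-1) (0, 0)).1
    (PySem.List.enumerate (PySem.List.slice queue none (some (-1))) 0).foldl
      (fun ans p => if p.2.2 ≤ up then PySem.List.slice queue (some (p.1 + 1)) none else ans)
      queue

-- ===== PRECONDITION & SPEC =====
def Spec_check (queue : List (Int × Int)) (out : List (Int × Int)) : Prop := out = check_alt queue
instance (queue : List (Int × Int)) (out : List (Int × Int)) : Decidable (Spec_check queue out) := by unfold Spec_check; infer_instance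

-- ===== CLAIM (what is proved, stated in full; the proofs are below) =====
def Claim_equal_check : Prop := ∀ (queue : List (Int × Int)), Dom_check queue → Spec_check queue (check queue)

-- ===== LEMMAS AND PROOFS =====

-- A's loop returns the slice for the FIRST matching index of its (descending) list.
theorem checkGo_eq (queue : List (Int × Int)) (L : List Int) :
    checkGo queue L
      = match L.find? (fun i => decide ((PySem.List.pyGetD queue i (0, 0)).2
            ≤ (PySem.List.pyGetD queue (-1) (0, 0)).1)) with
        | some i => PySem.List.slice queue (some (i + 1)) none
        | none => queue := by
  induction L with
  | nil => rfl
  | cons i rest ih =>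
    by_cases hp : (PySem.List.pyGetD queue i (0, 0)).2 ≤ (PySem.List.pyGetD queue (-1) (0, 0)).1
    · simp [checkGo, List.find?, hp, not_lt.mpr hp]
    · simp only [checkGo, List.find?, hp, decide_false]
      rw [if_pos (by omega)]
      exact ih

-- A forward fold keeping the last match equals picking the first match of the reversed list.
theorem lastPick {α β : Type} (P : β → Prop) [DecidablePred P] (g : β → α) :
    ∀ (L : List β) (d : α),
      L.foldl (fun a i => if P i then g i else a) d
        = match L.reverse.find? (fun i => decide (P i)) with
          | some i => g i
          | none => d := by
  intro L
  induction L with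
  | nil => intro d; rfl
  | cons x L ih =>
    intro d
    rw [List.foldl_cons, ih, List.reverse_cons, List.find?_append]
    cases hL : L.reverse.find? (fun i => decide (P i)) with
    | some i => simp
    | none =>
      by_cases hp : P x <;> simp [List.find?, hp]

theorem check_eq_alt (queue : List (Int × Int)) : check queue = check_alt queue := by
  unfold check check_alt
  by_cases h : queue.length ≤ 1
  · simp [h]
  · have hn : 2 ≤ queue.length := by omega
    simp only [h, if_false]
    rw [PySem.List.slice_to_neg_one,
        PySem.List.enumerate_eq_map_pyRange queue.dropLast ((0 : Int), (0 : Int)), List.foldl_map]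
    simp only
    rw [PySem.List.foldl_congr_mem _ _
        (fun ans j => if (PySem.List.pyGetD queue j ((0 : Int), (0 : Int))).2
              ≤ (PySem.List.pyGetD queue (-1) ((0 : Int), (0 : Int))).1
            then PySem.List.slice queue (some (j + 1)) none else ans) _
        (by
          intro acc j hj
          have hj' := (PySem.List.mem_pyRange_one.mp hj)
          have hlen : queue.dropLast.length = queue.length - 1 := by simp
          have h0 : 0 ≤ j := hj'.1
          have h1 : j < (queue.dropLast.length : Int) := hj'.2
          have h2 : j < (queue.length : Int) := by omega
          simp only [PySem.List.pyGetD_eq_getElem queue.dropLast ((0 : Int), (0 : Int)) h0 h1,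
            PySem.List.pyGetD_eq_getElem queue ((0 : Int), (0 : Int)) h0 h2,
            List.getElem_dropLast])]
    rw [lastPick (fun j => (PySem.List.pyGetD queue j ((0 : Int), (0 : Int))).2
          ≤ (PySem.List.pyGetD queue (-1) ((0 : Int), (0 : Int))).1)]
    rw [checkGo_eq]
    have hdl : ((queue.dropLast.length : Nat) : Int) = (queue.length : Int) - 1 := by
      have hlen : queue.dropLast.length = queue.length - 1 := by simp
      omega
    have hr : PySem.List.pyRange ((queue.length : Int) - 2) (-1) (-1)
        = (PySem.List.pyRange 0 ((queue.dropLast.length : Int)) 1).reverse := by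
      rw [PySem.List.pyRange_neg_one_eq_reverse, hdl]
      congr 2 <;> omega
    rw [hr]
    simp only [PySem.List.len, List.length_dropLast]
    cases hF : List.find?
        (fun i => decide ((PySem.List.pyGetD queue i (0, 0)).2
          ≤ (PySem.List.pyGetD queue (-1) (0, 0)).1))
        (PySem.List.pyRange 0 (((queue.length - 1 : Nat)) : Int) 1).reverse <;>
      simp [hF]

-- ===== VERDICT (by name: the statement is the Claim_ definition above) =====
theorem check_spec : Claim_equal_check := by
  intro queue _
  unfold Spec_check
  exact check_eq_alt queue
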